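-- pv_equiv track=rewrite | github.com/Knuckles92/SimpleAiTranscribe | ui/hotkey_dialog.py | _validate_hotkey
-- ===== SOURCE A (Python) =====
-- def _validate_hotkey(hotkey_string: str) -> bool:
--     """Validate a hotkey string format.
--
--     Args:
--         hotkey_string: Hotkey string to validate.
--
--     Returns:
--         True if valid, False otherwise.
--     """
--     if not hotkey_string:
--         return False
--
--     # Basic validation - could be enhanced
--     parts = hotkey_string.lower().split('+')
--     if len(parts) == 0:
--         return False
--
--     # Check for valid modifiers
--     valid_modifiers = {'ctrl', 'alt', 'shift', 'win'}
--     for part in parts[:-1]:  # All but last should be modifiers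
--         if part not in valid_modifiers:
--             return False
--
--     # Last part should be the key
--     main_key = parts[-1]
--     if not main_key:
--         return False
--
--     return True
-- ===== SOURCE B (Python) =====
-- def _validate_hotkey(hotkey_string: str) -> bool:
--     """Validate a hotkey string format by stripping leading modifier prefixes."""
--     s = hotkey_string.lower()
--     stripped = True
--     while stripped:
--         stripped = False
--         for mod in ('ctrl+', 'alt+', 'shift+', 'win+'):
--             if s.startswith(mod):
--                 s = s[len(mod):]
--                 stripped = True
--                 break
--     return bool(s) and '+' not in s
-- ===== Notes on version B (the rewrite author's own statement) =====
-- stated objective: alternative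
-- what changed: B replaces A's split-into-parts-then-loop validation by repeatedly stripping a leading modifier prefix (including its separator) from the lowercased string and then checking that the remainder is nonempty and separator-free.
import Mathlib
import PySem

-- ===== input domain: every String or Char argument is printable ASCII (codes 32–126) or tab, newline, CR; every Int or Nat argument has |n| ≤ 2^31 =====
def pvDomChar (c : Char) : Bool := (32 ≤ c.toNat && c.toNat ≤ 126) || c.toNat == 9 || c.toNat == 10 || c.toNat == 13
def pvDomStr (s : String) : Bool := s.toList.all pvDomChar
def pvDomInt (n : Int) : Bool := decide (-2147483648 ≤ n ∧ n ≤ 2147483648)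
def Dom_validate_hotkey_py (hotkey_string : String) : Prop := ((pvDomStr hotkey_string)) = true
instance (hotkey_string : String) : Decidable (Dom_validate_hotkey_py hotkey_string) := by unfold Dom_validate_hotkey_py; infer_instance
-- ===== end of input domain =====

-- B differs from A structurally: A splits the string into parts and loops over them; B
-- repeatedly strips a leading modifier prefix and checks the remainder (alternative, same cost).

-- ===== PORT A =====
-- valid_modifiers = {'ctrl', 'alt', 'shift', 'win'}
def pvValidModifiers : List (List Char) :=
  ["ctrl".toList, "alt".toList, "shift".toList, "win".toList]

-- 'for part in parts[:-1]: if part not in valid_modifiers: return False'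
def pvModLoop : List (List Char) → Bool
  | [] => true
  | p :: ps => if ¬ (p ∈ pvValidModifiers) then false else pvModLoop ps

def validate_hotkey_py (hotkey_string : String) : Bool :=
  -- if not hotkey_string: return False
  if hotkey_string.toList = [] then false
  else
    -- parts = hotkey_string.lower().split('+')
    let parts := PySem.Chars.splitOn (PySem.Chars.lower hotkey_string.toList) ['+']
    -- if len(parts) == 0: return False
    if parts.length = 0 then false
    else
      if pvModLoop (PySem.List.slice parts none (some (-1))) = false then false
      else
        -- main_key = parts[-1]  (parts is never empty, so pyGet? is always some)
        match PySem.List.pyGet? parts (-1) with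
        | none => false
        | some main_key => if main_key = [] then false else true

-- ===== PORT B =====
-- the inner 'for mod in (...): if s.startswith(mod): s = s[len(mod):] ...' loop of Source B,
-- iterated by the outer while loop: one recursive strip per successful prefix match
def pvStripMods (t : List Char) : List Char :=
  if PySem.Chars.startswith t "ctrl+".toList then pvStripMods (t.drop 5)
  else if PySem.Chars.startswith t "alt+".toList then pvStripMods (t.drop 4)
  else if PySem.Chars.startswith t "shift+".toList then pvStripMods (t.drop 6)
  else if PySem.Chars.startswith t "win+".toList then pvStripMods (t.drop 4)
  else t
termination_by t.length
decreasing_by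
  all_goals
    rename_i h
    have hp := (PySem.Chars.startswith_iff _ _).mp h
    have hl := hp.length_le
    simp at hl ⊢
    omega

def validate_hotkey_py_alt (hotkey_string : String) : Bool :=
  -- s = hotkey_string.lower(); strip leading modifier+ prefixes
  let r := pvStripMods (PySem.Chars.lower hotkey_string.toList)
  -- return bool(s) and '+' not in s
  decide (r ≠ []) && ! PySem.Chars.isIn ['+'] r

-- ===== PRECONDITION & SPEC =====
def Spec_validate_hotkey_py (hotkey_string : String) (out : Bool) : Prop := out = validate_hotkey_py_alt hotkey_string
instance (hotkey_string : String) (out : Bool) : Decidable (Spec_validate_hotkey_py hotkey_string out) := by unfold Spec_validate_hotkey_py; infer_instance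

-- ===== CLAIM (what is proved, stated in full; the proofs are below) =====
def Claim_equal_validate_hotkey_py : Prop := ∀ (hotkey_string : String), Dom_validate_hotkey_py hotkey_string → Spec_validate_hotkey_py hotkey_string (validate_hotkey_py hotkey_string)

-- ===== LEMMAS AND PROOFS =====

-- spec-level split on '+'
def mySplit : List Char → List Char → List (List Char)
  | cur, [] => [cur.reverse]
  | cur, c :: r => if c = '+' then cur.reverse :: mySplit [] r else mySplit (c :: cur) r

lemma mySplit_ne_nil (cur l : List Char) : mySplit cur l ≠ [] := by
  induction l generalizing cur with
  | nil => simp [mySplit]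
  | cons c r ih => by_cases h : c = '+' <;> simp [mySplit, h, ih]

lemma mySplit_no_plus (cur l : List Char) (h : '+' ∉ l) :
    mySplit cur l = [cur.reverse ++ l] := by
  induction l generalizing cur with
  | nil => simp [mySplit]
  | cons c r ih =>
    simp only [List.mem_cons, not_or] at h
    simp [mySplit, Ne.symm h.1, ih _ h.2]

lemma mySplit_split (cur seg rest : List Char) (h : '+' ∉ seg) :
    mySplit cur (seg ++ '+' :: rest) = (cur.reverse ++ seg) :: mySplit [] rest := by
  induction seg generalizing cur with
  | nil => simp [mySplit]
  | cons c r ih =>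
    simp only [List.mem_cons, not_or] at h
    simp [mySplit, Ne.symm h.1, ih _ h.2]

lemma go_eq' : ∀ (fuel : Nat) (l cur : List Char) (acc : List (List Char)),
    l.length < fuel →
    PySem.Chars.splitOn.go ['+'] fuel l cur acc = acc.reverse ++ mySplit cur l := by
  intro fuel
  induction fuel with
  | zero => intro l cur acc h; omega
  | succ f ih =>
    intro l cur acc h
    cases l with
    | nil => simp [PySem.Chars.splitOn.go, mySplit]
    | cons c rest =>
      simp only [PySem.Chars.splitOn.go]
      by_cases hc : c = '+'
      · subst hc
        simp only [List.isPrefixOf, List.length_cons] at *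
        simp [ih rest [] (cur.reverse :: acc) (by simpa using Nat.lt_of_succ_lt_succ h), mySplit]
      · have : List.isPrefixOf ['+'] (c :: rest) = false := by
          simp [List.isPrefixOf, Ne.symm hc]
        simp [this, ih rest (c :: cur) acc (by simpa using Nat.lt_of_succ_lt_succ h), mySplit, hc]

lemma splitOn_eq (l : List Char) : PySem.Chars.splitOn l ['+'] = mySplit [] l := by
  have := go_eq' (l.length + 1) l [] [] (by omega)
  simpa [PySem.Chars.splitOn] using this

lemma prefix_plus (m : List Char) : ∀ (seg rest : List Char), '+' ∉ m → '+' ∉ seg →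
    ((m ++ ['+']) <+: (seg ++ '+' :: rest) ↔ m = seg) := by
  induction m with
  | nil =>
    intro seg rest _ hs
    cases seg with
    | nil => simp
    | cons c s' =>
      simp only [List.mem_cons, not_or] at hs
      simp only [List.nil_append]
      simpa using fun h => hs.1 h
  | cons a m' ih =>
    intro seg rest hm hs
    simp only [List.mem_cons, not_or] at hm
    cases seg with
    | nil =>
      simp only [List.nil_append]
      simpa using fun h => absurd h.symm hm.1
    | cons c s' =>
      simp only [List.mem_cons, not_or] at hs
      simp [List.cons_prefix_cons, ih s' rest hm.2 hs.2]


lemma stripMods_no_plus (t : List Char) (h : '+' ∉ t) : pvStripMods t = t := by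
  have np : ∀ m : List Char, '+' ∈ m → PySem.Chars.startswith t m = false := by
    intro m hm
    cases hb : PySem.Chars.startswith t m
    · rfl
    · exact absurd (((PySem.Chars.startswith_iff t m).mp hb).subset hm) h
  rw [pvStripMods]
  rw [np _ (by decide), np _ (by decide), np _ (by decide), np _ (by decide)]
  simp

lemma startswith_mod_iff (m seg rest : List Char) (hm : '+' ∉ m) (hs : '+' ∉ seg) :
    PySem.Chars.startswith (seg ++ '+' :: rest) (m ++ ['+']) = decide (m = seg) := by
  by_cases h : m = seg
  · subst h
    have hp : (m ++ ['+']) <+: (m ++ '+' :: rest) := ⟨rest, by simp⟩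
    simp [(PySem.Chars.startswith_iff _ _).mpr hp]
  · have hnp : ¬ (m ++ ['+']) <+: (seg ++ '+' :: rest) :=
      fun hp => h ((prefix_plus m seg rest hm hs).mp hp)
    have hfalse : PySem.Chars.startswith (seg ++ '+' :: rest) (m ++ ['+']) = false := by
      cases hb : PySem.Chars.startswith (seg ++ '+' :: rest) (m ++ ['+'])
      · rfl
      · exact absurd ((PySem.Chars.startswith_iff _ _).mp hb) hnp
    simp [hfalse, h]

-- the central loop invariant: B's stripped-remainder test equals A's parts test
lemma key_aux : ∀ (n : Nat) (t : List Char), t.length ≤ n →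
    (decide (pvStripMods t ≠ []) && ! PySem.Chars.isIn ['+'] (pvStripMods t))
    = (pvModLoop (mySplit [] t).dropLast && decide ((mySplit [] t).getLast? ≠ some [])) := by
  intro n
  induction n with
  | zero =>
    intro t ht
    have : t = [] := List.eq_nil_of_length_eq_zero (Nat.le_zero.mp ht)
    subst this
    rw [stripMods_no_plus [] (by simp)]
    decide
  | succ n ih =>
    intro t ht
    by_cases hplus : '+' ∈ t
    · -- t = seg ++ '+' :: rest with '+' ∉ seg
      set seg := t.takeWhile (fun x => x ≠ '+') with hseg
      have hdw : t.dropWhile (fun x => x ≠ '+') ≠ [] := by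
        simp only [ne_eq, List.dropWhile_eq_nil_iff, not_forall]
        exact ⟨'+', hplus, by simp⟩
      obtain ⟨rest, hrest⟩ : ∃ rest, t.dropWhile (fun x => x ≠ '+') = '+' :: rest := by
        cases hd : t.dropWhile (fun x => x ≠ '+') with
        | nil => exact absurd hd hdw
        | cons c r =>
          have hnp := List.head_dropWhile_not (p := fun x => decide (x ≠ '+')) (l := t) hdw
          simp only [hd, List.head_cons] at hnp
          simp at hnp
          refine ⟨r, ?_⟩
          rw [hnp]
      have ht' : t = seg ++ '+' :: rest := by
        rw [hseg, ← hrest, List.takeWhile_append_dropWhile]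
      have hsegp : '+' ∉ seg := by
        intro hm
        have := List.mem_takeWhile_imp hm
        simp at this
      have hlen : rest.length ≤ n := by
        have h2 := congrArg List.length ht'
        simp only [List.length_append, List.length_cons] at h2
        omega
      have hdropseg : t.drop (seg.length + 1) = rest := by
        rw [ht', show seg ++ '+' :: rest = (seg ++ ['+']) ++ rest by simp,
          show seg.length + 1 = (seg ++ ['+']).length by simp]
        exact List.drop_left
      have hsplit : mySplit [] t = seg :: mySplit [] rest := by
        rw [ht', mySplit_split [] seg rest hsegp]; rfl
      obtain ⟨k, ks, hks⟩ : ∃ k ks, mySplit [] rest = k :: ks := by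
        cases h : mySplit [] rest with
        | nil => exact absurd h (mySplit_ne_nil [] rest)
        | cons k ks => exact ⟨k, ks, rfl⟩
      have hdl : (mySplit [] t).dropLast = seg :: (mySplit [] rest).dropLast := by
        rw [hsplit, hks]; rfl
      have hgl : (mySplit [] t).getLast? = (mySplit [] rest).getLast? := by
        rw [hsplit, hks]; rfl
      have sw : ∀ m : List Char, '+' ∉ m →
          PySem.Chars.startswith t (m ++ ['+']) = decide (m = seg) := by
        intro m hm
        rw [ht']; exact startswith_mod_iff m seg rest hm hsegp
      have swc : PySem.Chars.startswith t "ctrl+".toList = decide ("ctrl".toList = seg) := by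
        rw [show ("ctrl+".toList : List Char) = "ctrl".toList ++ ['+'] by decide]
        exact sw _ (by decide)
      have swa : PySem.Chars.startswith t "alt+".toList = decide ("alt".toList = seg) := by
        rw [show ("alt+".toList : List Char) = "alt".toList ++ ['+'] by decide]
        exact sw _ (by decide)
      have sws : PySem.Chars.startswith t "shift+".toList = decide ("shift".toList = seg) := by
        rw [show ("shift+".toList : List Char) = "shift".toList ++ ['+'] by decide]
        exact sw _ (by decide)
      have sww : PySem.Chars.startswith t "win+".toList = decide ("win".toList = seg) := by
        rw [show ("win+".toList : List Char) = "win".toList ++ ['+'] by decide]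
        exact sw _ (by decide)
      rw [hdl, hgl, pvStripMods, swc, swa, sws, sww]
      by_cases h1 : "ctrl".toList = seg
      · rw [if_pos (by simp [h1])]
        rw [show t.drop 5 = rest by
          rw [show (5 : Nat) = seg.length + 1 by rw [← h1]; decide]; exact hdropseg]
        rw [ih rest hlen]
        have : seg ∈ pvValidModifiers := by rw [← h1]; decide
        simp [pvModLoop, this]
      · rw [if_neg (by simpa using h1)]
        by_cases h2 : "alt".toList = seg
        · rw [if_pos (by simp [h2])]
          rw [show t.drop 4 = rest by
            rw [show (4 : Nat) = seg.length + 1 by rw [← h2]; decide]; exact hdropseg]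
          rw [ih rest hlen]
          have : seg ∈ pvValidModifiers := by rw [← h2]; decide
          simp [pvModLoop, this]
        · rw [if_neg (by simpa using h2)]
          by_cases h3 : "shift".toList = seg
          · rw [if_pos (by simp [h3])]
            rw [show t.drop 6 = rest by
              rw [show (6 : Nat) = seg.length + 1 by rw [← h3]; decide]; exact hdropseg]
            rw [ih rest hlen]
            have : seg ∈ pvValidModifiers := by rw [← h3]; decide
            simp [pvModLoop, this]
          · rw [if_neg (by simpa using h3)]
            by_cases h4 : "win".toList = seg
            · rw [if_pos (by simp [h4])]
              rw [show t.drop 4 = rest by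
                rw [show (4 : Nat) = seg.length + 1 by rw [← h4]; decide]; exact hdropseg]
              rw [ih rest hlen]
              have : seg ∈ pvValidModifiers := by rw [← h4]; decide
              simp [pvModLoop, this]
            · rw [if_neg (by simpa using h4)]
              have hisin : PySem.Chars.isIn ['+'] t = true := by
                rw [PySem.Chars.isIn_iff_infix]
                exact (List.singleton_infix_iff '+' t).mpr hplus
              have hnm : seg ∉ pvValidModifiers := by
                simp only [pvValidModifiers, List.mem_cons, not_or]
                exact ⟨fun h => h1 h.symm, fun h => h2 h.symm, fun h => h3 h.symm,
                  fun h => h4 h.symm, by simp⟩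
              rw [hisin]
              simp [pvModLoop, hnm]
    · -- no '+': A keeps the single part, B strips nothing
      have hsplit : mySplit [] t = [t] := by
        have := mySplit_no_plus [] t hplus
        simpa using this
      have hisin : PySem.Chars.isIn ['+'] t = false := by
        rw [PySem.Chars.isIn_eq_false_iff]
        intro hinf
        exact hplus ((List.singleton_infix_iff '+' t).mp hinf)
      rw [stripMods_no_plus t hplus, hsplit, hisin]
      cases t with
      | nil => decide
      | cons c r => simp [pvModLoop]

-- ===== VERDICT (by name: the statement is the Claim_ definition above) =====
theorem validate_hotkey_py_spec : Claim_equal_validate_hotkey_py := by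
  intro s _
  unfold Spec_validate_hotkey_py validate_hotkey_py validate_hotkey_py_alt
  have hkey := key_aux (PySem.Chars.lower s.toList).length (PySem.Chars.lower s.toList) le_rfl
  by_cases hnil : s.toList = []
  · rw [if_pos hnil]
    have hT : PySem.Chars.lower s.toList = [] := by rw [hnil]; rfl
    rw [hT, stripMods_no_plus [] (by simp)]
    decide
  · rw [if_neg hnil]
    simp only [splitOn_eq, PySem.List.slice_to_neg_one, PySem.List.pyGet?_neg_one]
    rw [hkey]
    cases hp : mySplit [] (PySem.Chars.lower s.toList) with
    | nil => exact absurd hp (mySplit_ne_nil _ _)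
    | cons k ks =>
      have hgl : (k :: ks).getLast? = some ((k :: ks).getLast (by simp)) :=
        List.getLast?_eq_some_getLast (by simp)
      rw [hgl]
      simp only [List.length_cons]
      rw [if_neg (by omega)]
      cases hm : pvModLoop (k :: ks).dropLast with
      | false => simp
      | true =>
        by_cases hl : (k :: ks).getLast (by simp) = [] <;> simp [hl]
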